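-- pv_equiv track=rewrite | github.com/slpanir/anony-AGD | exp/defense_adv-meanGAME.py | compute_layer_head_mapping
-- ===== SOURCE A (Python) =====
-- def compute_layer_head_mapping(target_layers, target_heads, num_heads_per_layer):
--     layer_head_map = {layer: [] for layer in target_layers}
--     for head_id in target_heads:
--         layer_idx = head_id // num_heads_per_layer
--         head_idx = head_id % num_heads_per_layer
--         if layer_idx in layer_head_map:
--             layer_head_map[layer_idx].append(head_idx)
--     layer_head_map = {layer: heads for layer, heads in layer_head_map.items() if heads}
--     return layer_head_map
-- ===== SOURCE B (Python) =====
-- def compute_layer_head_mapping(target_layers, target_heads, num_heads_per_layer):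
--     # Layer-driven nested scan: for each distinct target layer, collect its heads
--     # directly from target_heads; no grouping dict at all.
--     result = {}
--     for layer in dict.fromkeys(target_layers):
--         heads = [h % num_heads_per_layer for h in target_heads
--                  if h // num_heads_per_layer == layer]
--         if heads:
--             result[layer] = heads
--     return result
-- ===== Notes on version B (the rewrite author's own statement) =====
-- stated objective: alternative
-- what changed: B transposes the loops: instead of A's head-driven grouping into a pre-populated layer dict, B iterates the distinct target layers and for each one scans target_heads with a filtering comprehension, using no grouping dict at all (trades hash bucketing for an O(L*H) nested scan).
import Mathlib
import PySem

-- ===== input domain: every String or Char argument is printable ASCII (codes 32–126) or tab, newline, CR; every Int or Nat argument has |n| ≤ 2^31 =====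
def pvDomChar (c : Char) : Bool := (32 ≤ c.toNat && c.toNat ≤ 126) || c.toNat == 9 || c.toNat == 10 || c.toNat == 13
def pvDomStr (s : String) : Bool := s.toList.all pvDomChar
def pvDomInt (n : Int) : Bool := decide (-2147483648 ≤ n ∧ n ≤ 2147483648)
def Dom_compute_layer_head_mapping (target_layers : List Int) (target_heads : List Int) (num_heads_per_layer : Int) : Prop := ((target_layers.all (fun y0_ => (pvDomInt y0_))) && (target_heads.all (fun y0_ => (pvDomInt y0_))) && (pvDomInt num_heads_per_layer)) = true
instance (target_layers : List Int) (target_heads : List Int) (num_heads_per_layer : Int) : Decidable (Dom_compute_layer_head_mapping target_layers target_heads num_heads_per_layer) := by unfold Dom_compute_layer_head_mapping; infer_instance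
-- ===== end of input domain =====

-- B replaces A's head-driven dict grouping by a layer-driven nested scan of target_heads
-- (alternative decomposition; no grouping dict, at an O(L*H) nested-scan cost).

-- ===== PORT A =====
def compute_layer_head_mapping (target_layers : List Int) (target_heads : List Int) (num_heads_per_layer : Int) : List (Int × List Int) :=
  -- layer_head_map = {layer: [] for layer in target_layers}
  let d0 : PySem.Dict Int (List Int) :=
    target_layers.foldl (fun d layer => d.insert layer []) PySem.Dict.empty
  -- for head_id in target_heads: … if layer_idx in layer_head_map: append
  let d1 : PySem.Dict Int (List Int) :=
    target_heads.foldl (fun d head_id =>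
      let layer_idx := PySem.Int.floordiv head_id num_heads_per_layer
      let head_idx := PySem.Int.mod head_id num_heads_per_layer
      if d.contains layer_idx then d.modify layer_idx [] (fun hs => hs ++ [head_idx]) else d) d0
  -- layer_head_map = {layer: heads for layer, heads in layer_head_map.items() if heads}
  let d2 : PySem.Dict Int (List Int) :=
    d1.items.foldl (fun d p => if p.2 ≠ [] then d.insert p.1 p.2 else d) PySem.Dict.empty
  d2.items

-- ===== PORT B =====
def compute_layer_head_mapping_alt (target_layers : List Int) (target_heads : List Int) (num_heads_per_layer : Int) : List (Int × List Int) :=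
  -- for layer in dict.fromkeys(target_layers):
  --   heads = [h % n for h in target_heads if h // n == layer]; if heads: result[layer] = heads
  let result : PySem.Dict Int (List Int) :=
    (PySem.List.dedup target_layers).foldl (fun d layer =>
      let heads := (target_heads.filter (fun h => PySem.Int.floordiv h num_heads_per_layer == layer)).map
        (fun h => PySem.Int.mod h num_heads_per_layer)
      if heads ≠ [] then d.insert layer heads else d) PySem.Dict.empty
  result.items

-- ===== PRECONDITION & SPEC =====
-- Pre_ excludes exactly the inputs where Python A raises ZeroDivisionError:
-- num_heads_per_layer = 0 with a nonempty target_heads.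
def Pre_compute_layer_head_mapping (target_layers : List Int) (target_heads : List Int) (num_heads_per_layer : Int) : Prop :=
  target_heads = [] ∨ num_heads_per_layer ≠ 0
instance (target_layers : List Int) (target_heads : List Int) (num_heads_per_layer : Int) : Decidable (Pre_compute_layer_head_mapping target_layers target_heads num_heads_per_layer) := by unfold Pre_compute_layer_head_mapping; infer_instance
def pvWitness_compute_layer_head_mapping : List Int × List Int × Int := ([0, 1], [0, 1, 2, 3, 5], 2)

def Spec_compute_layer_head_mapping (target_layers : List Int) (target_heads : List Int) (num_heads_per_layer : Int) (out : List (Int × List Int)) : Prop := out = compute_layer_head_mapping_alt target_layers target_heads num_heads_per_layer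
instance (target_layers : List Int) (target_heads : List Int) (num_heads_per_layer : Int) (out : List (Int × List Int)) : Decidable (Spec_compute_layer_head_mapping target_layers target_heads num_heads_per_layer out) := by unfold Spec_compute_layer_head_mapping; infer_instance

-- ===== CLAIM (what is proved, stated in full; the proofs are below) =====
def Claim_equal_compute_layer_head_mapping : Prop := ∀ (target_layers : List Int) (target_heads : List Int) (num_heads_per_layer : Int), Dom_compute_layer_head_mapping target_layers target_heads num_heads_per_layer → Pre_compute_layer_head_mapping target_layers target_heads num_heads_per_layer → Spec_compute_layer_head_mapping target_layers target_heads num_heads_per_layer (compute_layer_head_mapping target_layers target_heads num_heads_per_layer)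

-- ===== LEMMAS AND PROOFS =====

-- heads (mod n) of target_heads that fall in layer l
def headsFor (th : List Int) (n l : Int) : List Int :=
  (th.filter (fun h => PySem.Int.floordiv h n == l)).map (fun h => PySem.Int.mod h n)

-- A's comprehension dict has value [] at every key
lemma d0_getD (tl : List Int) (d : PySem.Dict Int (List Int)) (l : Int)
    (h : ∀ k, d.getD k [] = []) :
    (tl.foldl (fun d layer => d.insert layer []) d).getD l [] = [] := by
  induction tl generalizing d with
  | nil => exact h l
  | cons x xs ih =>
      simp only [List.foldl_cons]
      exact ih _ (fun k => by rw [PySem.Dict.getD_insert]; split <;> simp [h])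

lemma d0_keys (tl : List Int) :
    ((tl.foldl (fun d layer => d.insert layer ([] : List Int)) PySem.Dict.empty)).keys
      = PySem.List.dedup tl := by
  rw [PySem.Dict.keys_foldl_insert]
  simp [PySem.List.dedup_eq_ofList, PySem.Dict.keys_empty, PySem.Set.update_nil_left]

-- A's head loop: keys unchanged
lemma d1_keys (th : List Int) (n : Int) (d : PySem.Dict Int (List Int)) :
    (th.foldl (fun d head_id =>
      let layer_idx := PySem.Int.floordiv head_id n
      let head_idx := PySem.Int.mod head_id n
      if d.contains layer_idx then d.modify layer_idx [] (fun hs => hs ++ [head_idx]) else d) d).keys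
      = d.keys := by
  induction th generalizing d with
  | nil => rfl
  | cons x xs ih =>
      simp only [List.foldl_cons]
      split
      · rw [ih, PySem.Dict.keys_modify, PySem.Dict.keys_insert_of_contains _ _ (by assumption)]
      · exact ih d

-- A's head loop: lookups
lemma d1_getD (th : List Int) (n : Int) (d : PySem.Dict Int (List Int)) (l : Int) :
    (th.foldl (fun d head_id =>
      let layer_idx := PySem.Int.floordiv head_id n
      let head_idx := PySem.Int.mod head_id n
      if d.contains layer_idx then d.modify layer_idx [] (fun hs => hs ++ [head_idx]) else d) d).getD l []
      = d.getD l [] ++ (if d.contains l then headsFor th n l else []) := by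
  induction th generalizing d with
  | nil => simp [headsFor]
  | cons x xs ih =>
      simp only [List.foldl_cons]
      by_cases hc : d.contains (PySem.Int.floordiv x n) = true
      · simp only [hc, if_true]
        rw [ih]
        have hck : (d.modify (PySem.Int.floordiv x n) [] (fun hs => hs ++ [PySem.Int.mod x n])).contains l = d.contains l := by
          rw [PySem.Dict.contains_modify]
          by_cases hl : l = PySem.Int.floordiv x n
          · simp [hl, hc]
          · simp [hl]
        rw [hck, PySem.Dict.getD_modify]
        by_cases hl : l = PySem.Int.floordiv x n
        · subst hl
          simp only [hc, if_true]
          simp [headsFor]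
        · rw [if_neg hl]
          by_cases hdl : d.contains l = true
          · simp only [hdl, if_true]
            have : (PySem.Int.floordiv x n == l) = false := by
              simp; exact fun h => hl h.symm
            simp [headsFor, this]
          · simp [hdl]
      · simp only [Bool.not_eq_true] at hc
        simp only [hc]
        rw [ih]
        by_cases hdl : d.contains l = true
        · have : (PySem.Int.floordiv x n == l) = false := by
            simp
            intro h; rw [h] at hc; rw [hdl] at hc; exact Bool.false_ne_true hc.symm
          simp [hdl, headsFor, this]
        · simp [hdl]

-- a guarded insert fold over pairs with distinct fresh keys yields the filtered items
lemma items_guarded_insert (l : List (Int × List Int))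
    (hnd : (l.map Prod.fst).Nodup) :
    ((l.foldl (fun d p => if p.2 ≠ [] then d.insert p.1 p.2 else d)
        (PySem.Dict.empty : PySem.Dict Int (List Int)))).items
      = l.filter (fun p => p.2 ≠ []) := by
  have h1 : (l.foldl (fun d p => if p.2 ≠ [] then d.insert p.1 p.2 else d)
        (PySem.Dict.empty : PySem.Dict Int (List Int)))
      = (l.filter (fun p => p.2 ≠ [])).foldl (fun d p => d.insert p.1 p.2) PySem.Dict.empty := by
    rw [List.foldl_filter]
    simp only [decide_not]
    congr 1
    funext d p
    by_cases h : p.2 = [] <;> simp [h]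
  rw [h1]
  have h2 := PySem.Dict.items_foldl_insert_fresh
    (l := l.filter (fun p => p.2 ≠ [])) (d := (PySem.Dict.empty : PySem.Dict Int (List Int)))
    (k := Prod.fst) (v := Prod.snd) (by simp) ?_
  · simpa using h2
  · exact (List.Sublist.map Prod.fst List.filter_sublist).nodup hnd

-- canonical description of both sides
def canonical (tl th : List Int) (n : Int) : List (Int × List Int) :=
  ((PySem.List.dedup tl).filter (fun l => headsFor th n l ≠ [])).map (fun l => (l, headsFor th n l))

lemma portA_eq_canonical (tl th : List Int) (n : Int) :
    compute_layer_head_mapping tl th n = canonical tl th n := by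
  unfold compute_layer_head_mapping
  simp only []
  set d0 := tl.foldl (fun d layer => d.insert layer ([] : List Int)) PySem.Dict.empty with hd0
  set d1 := th.foldl (fun d head_id =>
      let layer_idx := PySem.Int.floordiv head_id n
      let head_idx := PySem.Int.mod head_id n
      if d.contains layer_idx then d.modify layer_idx [] (fun hs => hs ++ [head_idx]) else d) d0 with hd1
  have hk1 : d1.keys = PySem.List.dedup tl := by
    rw [hd1, d1_keys, hd0, d0_keys]
  have hnd1 : d1.keys.Nodup := by rw [hk1]; exact PySem.List.nodup_dedup tl
  have hget : ∀ l, l ∈ d1.keys → d1.getD l [] = headsFor th n l := by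
    intro l hl
    have hc0 : d0.contains l = true := by
      rw [PySem.Dict.contains_iff_mem_keys]
      rw [hd1, d1_keys] at hl
      exact hl
    rw [hd1, d1_getD, hc0, if_pos rfl, hd0,
      d0_getD _ _ _ (fun k => PySem.Dict.getD_empty _ _), List.nil_append]
  have hitems : d1.items = d1.keys.map (fun k => (k, d1.getD k [])) :=
    PySem.Dict.items_eq_map_keys d1 hnd1 []
  rw [items_guarded_insert d1.items (by
    have : d1.items.map Prod.fst = d1.keys := rfl
    rw [this]; exact hnd1)]
  have hcong : ∀ l ∈ PySem.List.dedup tl, d1.getD l [] = headsFor th n l :=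
    fun l hl => hget l (by rw [hk1]; exact hl)
  rw [hitems, hk1, List.filter_map]
  unfold canonical
  rw [List.filter_congr (fun l hl => by
    simp only [Function.comp_apply]
    rw [hcong l hl])]
  exact List.map_congr_left (fun l hl => by
    rw [hcong l (List.mem_of_mem_filter hl)])

lemma portB_eq_canonical (tl th : List Int) (n : Int) :
    compute_layer_head_mapping_alt tl th n = canonical tl th n := by
  unfold compute_layer_head_mapping_alt
  simp only []
  have h1 : ((PySem.List.dedup tl).foldl (fun d layer =>
      if headsFor th n layer ≠ [] then d.insert layer (headsFor th n layer) else d)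
      (PySem.Dict.empty : PySem.Dict Int (List Int)))
      = ((PySem.List.dedup tl).filter (fun l => headsFor th n l ≠ [])).foldl
          (fun d l => d.insert l (headsFor th n l)) PySem.Dict.empty := by
    rw [List.foldl_filter]
    congr 1
    funext d l
    by_cases h : headsFor th n l = [] <;> simp [h]
  show ((PySem.List.dedup tl).foldl (fun d layer =>
      if headsFor th n layer ≠ [] then d.insert layer (headsFor th n layer) else d)
      (PySem.Dict.empty : PySem.Dict Int (List Int))).items = _
  rw [h1]
  have h2 := PySem.Dict.items_foldl_insert_fresh
    (l := (PySem.List.dedup tl).filter (fun l => headsFor th n l ≠ []))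
    (d := (PySem.Dict.empty : PySem.Dict Int (List Int)))
    (k := fun l => l) (v := fun l => headsFor th n l) (by simp) ?_
  · rw [h2]
    unfold canonical
    simp [PySem.Dict.empty, PySem.Dict.items]
  · simp only [List.map_id']
    exact List.Sublist.nodup List.filter_sublist (PySem.List.nodup_dedup tl)

-- ===== VERDICT (by name: the statement is the Claim_ definition above) =====
theorem compute_layer_head_mapping_spec : Claim_equal_compute_layer_head_mapping := by
  intro tl th n _ _
  unfold Spec_compute_layer_head_mapping
  rw [portA_eq_canonical, portB_eq_canonical]
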